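-- pv_equiv track=rewrite | github.com/johnisanerd/meeting_note_taker | note_taker.py | consolidate_list_of_strings
-- ===== SOURCE A (Python) =====
-- def consolidate_list_of_strings(list, max_length=2000):
--     '''
--     This function takes a list of strings and combines any two strings that are less than the max_length.
--     Good practice to run this before running the GPT3 summarization function.  The larger text we feed GPT3,
--     the better the results.
--
--     Parameters
--     ----------
--     list : list
--         A list of strings.
--     max_length : int
--         The maximum length of a string.  If two strings are less than this length, they will be combined.
--
--     Returns
--     -------
--     list
--         A list of strings.  Any two strings that were less than the max_length have been combined.
--
--     '''
--     paragraphs = list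
--     i = 0
--     while i < len(paragraphs) - 1:
--         # go through each paragraph. If the next paragraph will fit in the current paragraph, combine them.
--         current_paragraph = paragraphs[i]
--         next_paragraph = paragraphs[i + 1]
--         if len(current_paragraph) + len(next_paragraph) + 1 < max_length:
--             # if the next paragraph will fit in the current paragraph, combine them.
--             paragraphs[i] = current_paragraph + " " + next_paragraph
--             del paragraphs[i + 1]   # remove the next paragraph from the list.  We've combined it with the current paragraph.
--
--         i += 1
--
--     return paragraphs
-- ===== SOURCE B (Python) =====
-- def consolidate_list_of_strings(list, max_length=2000):
--     # Single forward pass over the input building a NEW list: merge a pair and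
--     # advance by 2, otherwise copy one element and advance by 1.
--     # (A mutates its argument in place; B does not — the equivalence is about
--     # the return value only.)
--     out = []
--     n = len(list)
--     i = 0
--     while i < n - 1:
--         cur = list[i]
--         nxt = list[i + 1]
--         if len(cur) + len(nxt) + 1 < max_length:
--             out.append(cur + " " + nxt)
--             i += 2
--         else:
--             out.append(cur)
--             i += 1
--     if i == n - 1:
--         out.append(list[i])
--     return out
-- ===== Notes on version B (the rewrite author's own statement) =====
-- stated objective: faster
-- what changed: Replaced the in-place while loop that repeatedly deletes list elements (each del shifts the tail) with a single forward pass that builds a new output list, advancing the index by 2 on a merge and by 1 otherwise.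
import Mathlib
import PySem

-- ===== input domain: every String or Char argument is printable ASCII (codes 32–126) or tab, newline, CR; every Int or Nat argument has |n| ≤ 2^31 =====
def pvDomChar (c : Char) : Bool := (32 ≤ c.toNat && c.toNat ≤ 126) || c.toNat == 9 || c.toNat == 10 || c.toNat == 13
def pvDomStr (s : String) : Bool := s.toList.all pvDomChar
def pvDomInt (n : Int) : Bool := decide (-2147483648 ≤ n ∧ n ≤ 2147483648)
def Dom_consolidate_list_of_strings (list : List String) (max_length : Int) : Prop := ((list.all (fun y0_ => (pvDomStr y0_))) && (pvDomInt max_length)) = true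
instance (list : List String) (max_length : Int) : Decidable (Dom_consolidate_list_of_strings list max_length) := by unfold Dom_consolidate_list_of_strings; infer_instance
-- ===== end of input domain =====

-- B replaces A's quadratic in-place delete loop with one linear forward pass building a new
-- list (A mutates its argument in place; the equivalence proved here is about the return value only).

-- ===== PORT A =====
-- A's while loop: index i, mutation by set / eraseIdx; i stays ≥ 0 so a Nat index is exact
-- (Python's 'i < len(paragraphs) - 1' with len = 0 is '0 < -1' = false, matching Nat '0 < 0').
-- paragraphs[i] / paragraphs[i+1] are always in range when the guard holds, so getD is exact.
def pvLoopA (max_length : Int) (paragraphs : List String) (i : Nat) : List String :=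
  if _h : i < paragraphs.length - 1 then
    let current_paragraph := paragraphs.getD i ""
    let next_paragraph := paragraphs.getD (i + 1) ""
    if PySem.Str.len current_paragraph + PySem.Str.len next_paragraph + 1 < max_length then
      pvLoopA max_length
        ((paragraphs.set i (current_paragraph ++ " " ++ next_paragraph)).eraseIdx (i + 1))
        (i + 1)
    else
      pvLoopA max_length paragraphs (i + 1)
  else paragraphs
termination_by paragraphs.length - i
decreasing_by
  · have h2 : i + 1 < paragraphs.length := by omega
    simp only [List.length_eraseIdx, List.length_set, if_pos h2]
    omega
  · omega

def consolidate_list_of_strings (list : List String) (max_length : Int) : List String :=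
  pvLoopA max_length list 0

-- ===== PORT B =====
-- B's while loop over the unchanged input: accumulator out, i advances by 2 on a merge.
-- The trailing 'if i == n - 1' is over Python ints, so it is compared in Int here.
def pvLoopB (list : List String) (max_length : Int) (i : Nat) (out : List String) : List String :=
  if _h : i < list.length - 1 then
    let cur := list.getD i ""
    let nxt := list.getD (i + 1) ""
    if PySem.Str.len cur + PySem.Str.len nxt + 1 < max_length then
      pvLoopB list max_length (i + 2) (out ++ [cur ++ " " ++ nxt])
    else
      pvLoopB list max_length (i + 1) (out ++ [cur])
  else if (i : Int) = (list.length : Int) - 1 then out ++ [list.getD i ""] else out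
termination_by list.length - i

def consolidate_list_of_strings_alt (list : List String) (max_length : Int) : List String :=
  pvLoopB list max_length 0 []

-- ===== PRECONDITION & SPEC =====
def Spec_consolidate_list_of_strings (list : List String) (max_length : Int) (out : List String) : Prop := out = consolidate_list_of_strings_alt list max_length
instance (list : List String) (max_length : Int) (out : List String) : Decidable (Spec_consolidate_list_of_strings list max_length out) := by unfold Spec_consolidate_list_of_strings; infer_instance

-- ===== CLAIM (what is proved, stated in full; the proofs are below) =====
def Claim_equal_consolidate_list_of_strings : Prop := ∀ (list : List String) (max_length : Int), Dom_consolidate_list_of_strings list max_length → Spec_consolidate_list_of_strings list max_length (consolidate_list_of_strings list max_length)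

-- ===== LEMMAS AND PROOFS =====

-- Common reference function: the pair-merging pass, structurally.
def pvF (max_length : Int) : List String → List String
  | a :: b :: t =>
      if PySem.Str.len a + PySem.Str.len b + 1 < max_length then
        (a ++ " " ++ b) :: pvF max_length t
      else
        a :: pvF max_length (b :: t)
  | xs => xs

lemma pvLoopA_eq (ml : Int) : ∀ (n : Nat) (rest done : List String), rest.length = n →
    pvLoopA ml (done ++ rest) done.length = done ++ pvF ml rest := by
  intro n
  induction n using Nat.strong_induction_on with
  | _ n ih =>
    intro rest done hlen
    match rest with
    | [] =>
        rw [pvLoopA, dif_neg (by simp)]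
        simp [pvF]
    | [a] =>
        rw [pvLoopA, dif_neg (by simp)]
        simp [pvF]
    | a :: b :: t =>
        have hlen' : t.length + 2 = n := by simpa using hlen
        rw [pvLoopA]
        have hguard : done.length < (done ++ a :: b :: t).length - 1 := by
          simp only [List.length_append, List.length_cons]; omega
        have hga : (done ++ a :: b :: t).getD done.length "" = a := by
          simp [List.getD]
        have hgb : (done ++ a :: b :: t).getD (done.length + 1) "" = b := by
          simp [List.getD]
        simp only [hguard, dite_true, hga, hgb]
        by_cases hc : PySem.Str.len a + PySem.Str.len b + 1 < ml
        · simp only [hc, if_true]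
          have hset : (done ++ a :: b :: t).set done.length (a ++ " " ++ b)
              = done ++ (a ++ " " ++ b) :: b :: t := by
            rw [List.set_append_right _ _ (le_refl _)]
            simp
          have herase : (done ++ (a ++ " " ++ b) :: b :: t).eraseIdx (done.length + 1)
              = done ++ (a ++ " " ++ b) :: t := by
            rw [List.eraseIdx_append_of_length_le (by omega)]
            simp
          rw [hset, herase]
          have hF : pvF ml (a :: b :: t) = (a ++ " " ++ b) :: pvF ml t := by
            rw [pvF, if_pos hc]
          have hrec := ih t.length (by omega) t (done ++ [a ++ " " ++ b]) rfl
          rw [show done ++ (a ++ " " ++ b) :: t = (done ++ [a ++ " " ++ b]) ++ t by simp,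
              show done.length + 1 = (done ++ [a ++ " " ++ b]).length by simp,
              hrec, hF]
          simp
        · simp only [hc, if_false]
          have hF : pvF ml (a :: b :: t) = a :: pvF ml (b :: t) := by
            rw [pvF, if_neg hc]
          have hrec := ih (b :: t).length (by simp; omega) (b :: t) (done ++ [a]) rfl
          rw [show done ++ a :: b :: t = (done ++ [a]) ++ b :: t by simp,
              show done.length + 1 = (done ++ [a]).length by simp,
              hrec, hF]
          simp

lemma pvLoopB_eq (list : List String) (ml : Int) : ∀ (n i : Nat) (out : List String),
    list.length - i = n → pvLoopB list ml i out = out ++ pvF ml (list.drop i) := by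
  intro n
  induction n using Nat.strong_induction_on with
  | _ n ih =>
    intro i out hn
    rw [pvLoopB]
    by_cases hg : i < list.length - 1
    · have hi1 : i + 1 < list.length := by omega
      have hi : i < list.length := by omega
      have hdrop : list.drop i = list[i] :: list[i + 1] :: list.drop (i + 2) := by
        rw [List.drop_eq_getElem_cons hi, List.drop_eq_getElem_cons hi1]
      have hga : list.getD i "" = list[i] := List.getD_eq_getElem list "" hi
      have hgb : list.getD (i + 1) "" = list[i + 1] := List.getD_eq_getElem list "" hi1
      simp only [hg, dite_true, hga, hgb]
      by_cases hc : PySem.Str.len list[i] + PySem.Str.len list[i + 1] + 1 < ml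
      · simp only [hc, if_true]
        rw [ih (list.length - (i + 2)) (by omega) (i + 2) _ rfl,
            hdrop, pvF, if_pos hc]
        simp
      · simp only [hc, if_false]
        rw [ih (list.length - (i + 1)) (by omega) (i + 1) _ rfl,
            hdrop, pvF, if_neg hc, List.drop_eq_getElem_cons hi1]
        simp
    · simp only [hg, dite_false]
      by_cases he : (i : Int) = (list.length : Int) - 1
      · have hi : i < list.length := by omega
        have hd1 : list.drop i = [list[i]] := by
          rw [List.drop_eq_getElem_cons hi, List.drop_eq_nil_of_le (by omega : list.length ≤ i + 1)]
        rw [if_pos he, hd1, List.getD_eq_getElem list "" hi]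
        simp [pvF]
      · have hle : list.length ≤ i := by omega
        rw [if_neg he, List.drop_eq_nil_of_le hle]
        simp [pvF]

-- ===== VERDICT (by name: the statement is the Claim_ definition above) =====
theorem consolidate_list_of_strings_spec : Claim_equal_consolidate_list_of_strings := by
  intro list ml _
  unfold Spec_consolidate_list_of_strings consolidate_list_of_strings consolidate_list_of_strings_alt
  have ha := pvLoopA_eq ml list.length list [] rfl
  have hb := pvLoopB_eq list ml list.length 0 [] rfl
  simp only [List.nil_append, List.length_nil, List.drop_zero] at ha hb
  rw [ha, hb]
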